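-- pv_equiv track=rewrite | github.com/JacksonKearl/Calculator-The-Game-solver | main.py | insert_store_locs
-- ===== SOURCE A (Python) =====
-- def insert_store_locs(path):
--     seek = None
--     save = []
--     index = len(path) - 1
--     for trans, state in path[::-1]:
--         if state[0] == seek:
--             save.insert(0, index)
--             seek = None
--
--         if "RESTORE:" in trans:
--             seek = trans.split("RESTORE:")[1]
--
--         index -= 1
--
--     if seek != None:
--         save.insert(0, -1)
--
--     for i, index in enumerate(save):
--         i += index
--         path.insert(i + 1, ('STORE', path[i][1]))
--     return path
-- ===== SOURCE B (Python) =====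
-- def insert_store_locs(path):
--     seek = None
--     rev = []
--     for trans, state in reversed(path):
--         if state[0] == seek:
--             rev.append(('STORE', state))
--             seek = None
--         rev.append((trans, state))
--         if "RESTORE:" in trans:
--             seek = trans.split("RESTORE:")[1]
--     if seek is not None:
--         rev.append(('STORE', path[-1][1]))
--     rev.reverse()
--     path[:] = rev
--     return path
-- ===== Notes on version B (the rewrite author's own statement) =====
-- stated objective: alternative
-- what changed: Replaces A's second pass of repeated list.insert at computed shifting positions by a single reverse pass that emits the STORE markers inline while scanning for RESTORE matches, building the output list once.
import Mathlib
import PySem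

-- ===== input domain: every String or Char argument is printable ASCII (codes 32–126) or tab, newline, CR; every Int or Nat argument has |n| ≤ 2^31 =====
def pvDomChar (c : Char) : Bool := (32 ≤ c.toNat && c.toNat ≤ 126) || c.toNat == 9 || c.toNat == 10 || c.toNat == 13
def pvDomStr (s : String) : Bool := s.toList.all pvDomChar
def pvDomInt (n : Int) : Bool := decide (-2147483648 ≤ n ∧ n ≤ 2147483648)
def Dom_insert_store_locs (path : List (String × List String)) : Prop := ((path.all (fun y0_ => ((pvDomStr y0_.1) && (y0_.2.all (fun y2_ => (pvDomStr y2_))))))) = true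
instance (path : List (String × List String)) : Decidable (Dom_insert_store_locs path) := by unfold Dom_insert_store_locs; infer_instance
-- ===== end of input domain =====

-- B replaces A's second pass (repeated list.insert at computed shifting positions) by one
-- reverse pass emitting the STORE markers inline, building the output list once; both A and B
-- mutate `path` in place to the same final list; the equivalence proved is about the return value.

-- ===== PORT A =====
-- `state[0] == seek` : true iff seek is the string state[0]; on empty state Python raises
-- IndexError (excluded by Pre_), the port returns false there.
def pvMatch (seek : Option String) (state : List String) : Bool :=
  match PySem.List.pyGet? state 0 with
  | some c => seek == some c
  | none => false

-- `if "RESTORE:" in trans: seek = trans.split("RESTORE:")[1]`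
def pvRestore (trans : String) (seek : Option String) : Option String :=
  if PySem.Str.isIn "RESTORE:" trans then
    some (PySem.List.pyGetD ((PySem.Str.split? trans "RESTORE:").getD []) 1 "")
  else seek

-- body of A's first loop: state (seek, save, index)
def pvStepA (acc : Option String × List Int × Int) (ts : String × List String) :
    Option String × List Int × Int :=
  let m := pvMatch acc.1 ts.2
  let seek := if m then none else acc.1
  let save := if m then PySem.List.insert acc.2.1 0 acc.2.2 else acc.2.1
  (pvRestore ts.1 seek, save, acc.2.2 - 1)

-- body of A's second loop: `i += index; path.insert(i+1, ('STORE', path[i][1]))`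
-- (pyGetD is exact here: the accessed index is always in range, see insertPhase_lem)
def pvStepI (cur : List (String × List String)) (p : Int × Int) : List (String × List String) :=
  let j := p.1 + p.2
  PySem.List.insert cur (j + 1) ("STORE", (PySem.List.pyGetD cur j ("", [])).2)

def insert_store_locs (path : List (String × List String)) : List (String × List String) :=
  -- path[::-1]
  let r := ((PySem.List.slice? path none none (-1)).getD []).foldl pvStepA
      (none, [], PySem.List.len path - 1)
  let save := if r.1 ≠ none then PySem.List.insert r.2.1 0 (-1) else r.2.1
  (PySem.List.enumerate save 0).foldl pvStepI path

-- ===== PORT B =====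
-- body of B's single loop over reversed(path): state (seek, rev)
def pvStepB (acc : Option String × List (String × List String)) (ts : String × List String) :
    Option String × List (String × List String) :=
  let m := pvMatch acc.1 ts.2
  let seek := if m then none else acc.1
  let rev := (if m then acc.2 ++ [("STORE", ts.2)] else acc.2) ++ [ts]
  (pvRestore ts.1 seek, rev)

def insert_store_locs_alt (path : List (String × List String)) : List (String × List String) :=
  let r := path.reverse.foldl pvStepB (none, [])
  let rev := if r.1 ≠ none then
      r.2 ++ [("STORE", (PySem.List.pyGetD path (-1) ("", [])).2)]
    else r.2
  rev.reverse

-- ===== PRECONDITION & SPEC =====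
-- Pre_ excludes paths containing an entry with an empty state list: there `state[0]` raises
-- IndexError in A (and in B).
def Pre_insert_store_locs (path : List (String × List String)) : Prop :=
  ∀ p ∈ path, p.2 ≠ []
instance (path : List (String × List String)) : Decidable (Pre_insert_store_locs path) := by
  unfold Pre_insert_store_locs; infer_instance

def pvWitness_insert_store_locs : (List (String × List String)) :=
  [("RESTORE:x", ["y"]), ("+1", ["x"])]

def Spec_insert_store_locs (path : List (String × List String)) (out : List (String × List String)) : Prop := out = insert_store_locs_alt path
instance (path : List (String × List String)) (out : List (String × List String)) : Decidable (Spec_insert_store_locs path out) := by unfold Spec_insert_store_locs; infer_instance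

-- ===== CLAIM (what is proved, stated in full; the proofs are below) =====
def Claim_equal_insert_store_locs : Prop := ∀ (path : List (String × List String)), Dom_insert_store_locs path → Pre_insert_store_locs path → Spec_insert_store_locs path (insert_store_locs path)

-- ===== LEMMAS AND PROOFS =====

-- middle spec: one backwards scan computing the final seek and the per-element match marks
def scanE (sk : Option String) : List (String × List String) → Option String × List Bool
  | [] => (sk, [])
  | x :: xs =>
    let m := pvMatch (scanE sk xs).1 x.2
    (pvRestore x.1 (if m then none else (scanE sk xs).1), m :: (scanE sk xs).2)

-- splice a STORE copy after each marked element
def weave : List (String × List String) → List Bool → List (String × List String)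
  | [], _ => []
  | xs, [] => xs
  | x :: xs, b :: bs => x :: (if b then [("STORE", x.2)] else []) ++ weave xs bs

-- positions of the true marks, offset by `off`
def idxs (off : Int) : List Bool → List Int
  | [] => []
  | b :: bs => (if b then [off] else []) ++ idxs (off + 1) bs

theorem scanE_len (xs : List (String × List String)) (sk : Option String) :
    (scanE sk xs).2.length = xs.length := by
  induction xs with
  | nil => rfl
  | cons x xs ih => simp [scanE, ih]

theorem scanA_lem (xs : List (String × List String)) :
    ∀ (sk : Option String) (save : List Int) (off : Int),
    xs.reverse.foldl pvStepA (sk, save, off + xs.length - 1)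
      = ((scanE sk xs).1, idxs off (scanE sk xs).2 ++ save, off - 1) := by
  induction xs with
  | nil => intro sk save off; simp [scanE, idxs]
  | cons x xs ih =>
    intro sk save off
    have hidx : off + ((x :: xs).length : Int) - 1 = (off + 1) + (xs.length : Int) - 1 := by
      push_cast [List.length_cons]; ring
    rw [List.reverse_cons, List.foldl_append, hidx, ih sk save (off + 1)]
    have hoff : off + 1 - 1 = off := by ring
    by_cases hm : pvMatch (scanE sk xs).1 x.2 <;>
      simp [pvStepA, scanE, idxs, hm, hoff, PySem.List.insert_zero]

theorem scanB_lem (xs : List (String × List String)) :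
    ∀ (sk : Option String) (rev : List (String × List String)),
    xs.reverse.foldl pvStepB (sk, rev)
      = ((scanE sk xs).1, rev ++ (weave xs (scanE sk xs).2).reverse) := by
  induction xs with
  | nil => intro sk rev; simp [scanE, weave]
  | cons x xs ih =>
    intro sk rev
    rw [List.reverse_cons, List.foldl_append, ih sk rev]
    by_cases hm : pvMatch (scanE sk xs).1 x.2 <;>
      simp [pvStepB, scanE, weave, hm]

theorem pyGetD_append_len (done suf : List (String × List String)) (x : String × List String) :
    PySem.List.pyGetD (done ++ x :: suf) (done.length : Int) ("", []) = x := by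
  simp [PySem.List.pyGetD_natCast, List.getD_eq_getElem?_getD]

theorem insertPhase_lem (bs : List Bool) :
    ∀ (off k : Nat) (done suf : List (String × List String)),
    suf.length = bs.length → done.length = off + k →
    (PySem.List.enumerate (idxs (off : Int) bs) (k : Int)).foldl pvStepI (done ++ suf)
      = done ++ weave suf bs := by
  induction bs with
  | nil =>
    intro off k done suf hlen _
    have hsuf : suf = [] := by simpa using hlen
    subst hsuf
    simp [idxs, weave]
  | cons b bs ih =>
    intro off k done suf hlen hdone
    cases suf with
    | nil => simp at hlen
    | cons x suf' =>
      simp only [List.length_cons] at hlen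
      cases b with
      | false =>
        have hcast : (off : Int) + 1 = ((off + 1 : Nat) : Int) := by push_cast; ring
        have := ih (off + 1) k (done ++ [x]) suf' (by omega) (by simp; omega)
        have hid : idxs ((off : Int)) (false :: bs) = idxs (((off + 1 : Nat)) : Int) bs := by
          simp [idxs, ← hcast]
        rw [hid]
        calc (PySem.List.enumerate (idxs ((off + 1 : Nat) : Int) bs) (k : Int)).foldl pvStepI
                (done ++ x :: suf')
            = (PySem.List.enumerate (idxs ((off + 1 : Nat) : Int) bs) (k : Int)).foldl pvStepI
                ((done ++ [x]) ++ suf') := by simp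
          _ = (done ++ [x]) ++ weave suf' bs := this
          _ = done ++ weave (x :: suf') (false :: bs) := by simp [weave]
      | true =>
        have hcast : (off : Int) + 1 = ((off + 1 : Nat) : Int) := by push_cast; ring
        have hid : idxs ((off : Int)) (true :: bs) = (off : Int) :: idxs (((off + 1 : Nat)) : Int) bs := by
          simp [idxs, ← hcast]
        rw [hid, PySem.List.enumerate_cons, List.foldl_cons]
        have hstep : pvStepI (done ++ x :: suf') ((k : Int), (off : Int))
            = (done ++ [x, ("STORE", x.2)]) ++ suf' := by
          have hj : (k : Int) + (off : Int) = (done.length : Int) := by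
            push_cast [hdone]; ring
          have hj1 : (k : Int) + (off : Int) + 1 = ((done.length + 1 : Nat) : Int) := by
            push_cast [hdone]; ring
          rw [pvStepI, hj1, hj, pyGetD_append_len,
            PySem.List.insert_natCast _ _ _ (by simp)]
          have hts : (done ++ x :: suf').take (done.length + 1) = done ++ [x] := by
            have : done ++ x :: suf' = (done ++ [x]) ++ suf' := by simp
            rw [this, List.take_left' (by simp)]
          have hds : (done ++ x :: suf').drop (done.length + 1) = suf' := by
            have : done ++ x :: suf' = (done ++ [x]) ++ suf' := by simp
            rw [this, List.drop_left' (by simp)]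
          rw [hts, hds]; simp
        rw [hstep]
        have hcast2 : (k : Int) + 1 = ((k + 1 : Nat) : Int) := by push_cast; ring
        rw [hcast2,
          ih (off + 1) (k + 1) (done ++ [x, ("STORE", x.2)]) suf' (by omega) (by simp; omega)]
        simp [weave]

theorem scanE_fst_ne_none_imp (path : List (String × List String))
    (h : (scanE none path).1 ≠ none) : path ≠ [] := by
  intro hnil; subst hnil; exact h rfl

theorem ports_agree (path : List (String × List String)) :
    insert_store_locs path = insert_store_locs_alt path := by
  unfold insert_store_locs insert_store_locs_alt
  rw [PySem.List.slice?_none_none_neg_one]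
  have hstart : PySem.List.len path - 1 = 0 + (path.length : Int) - 1 := by
    simp [PySem.List.len_eq]
  rw [Option.getD_some, hstart, scanA_lem path none [] 0, scanB_lem path none []]
  simp only [List.append_nil, List.nil_append]
  by_cases hsk : (scanE none path).1 = none
  · simp only [hsk, ne_eq, not_true_eq_false, if_false]
    have h := insertPhase_lem (scanE none path).2 0 0 [] path
      (scanE_len path none).symm rfl
    norm_num at h
    rw [h]
    simp
  · simp only [hsk, ne_eq, not_false_eq_true, if_true]
    have hne : path ≠ [] := scanE_fst_ne_none_imp path hsk
    rw [PySem.List.insert_zero, PySem.List.enumerate_cons, List.foldl_cons]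
    have hstep : pvStepI path ((0 : Int), (-1 : Int))
        = [("STORE", (PySem.List.pyGetD path (-1) ("", [])).2)] ++ path := by
      rw [pvStepI]
      norm_num [PySem.List.insert_zero]
    rw [hstep]
    have h := insertPhase_lem (scanE none path).2 0 1
      [("STORE", (PySem.List.pyGetD path (-1) ("", [])).2)] path
      (scanE_len path none).symm rfl
    norm_num at h
    simpa using h

-- ===== VERDICT (by name: the statement is the Claim_ definition above) =====
theorem insert_store_locs_spec : Claim_equal_insert_store_locs := by
  intro path _ _
  unfold Spec_insert_store_locs
  exact ports_agree path
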